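-- pv_equiv track=rewrite | github.com/DesislavaDimitrova/HackBulgaria | week0/2-Python-harder-problems-set /10.Member_of_nth_fib_lists.py | member_of_nth_fib_lists
-- ===== SOURCE A (Python) =====
-- def member_of_nth_fib_lists(listA, listB, needle):
--     i = 2
--     while i < 10:
--         next_list = listA + listB
--         listA = listB
--         listB = next_list
--         i += 1
--     return ''.join(map(str, needle)) in ''.join(map(str, listA))
-- ===== SOURCE B (Python) =====
-- def member_of_nth_fib_lists(listA, listB, needle):
--     def fib(n):
--         if n == 0:
--             return listA
--         if n == 1:
--             return listB
--         return fib(n - 2) + fib(n - 1)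
--     return ''.join(map(str, needle)) in ''.join(map(str, fib(8)))
-- ===== Notes on version B (the rewrite author's own statement) =====
-- stated objective: alternative
-- what changed: Replaces the iterative while-loop that shuffles (listA, listB) pairs eight times with a recursive helper fib(n) unfolding the Fibonacci concatenation recurrence fib(n)=fib(n-2)+fib(n-1) and testing membership in fib(8).
import Mathlib
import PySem

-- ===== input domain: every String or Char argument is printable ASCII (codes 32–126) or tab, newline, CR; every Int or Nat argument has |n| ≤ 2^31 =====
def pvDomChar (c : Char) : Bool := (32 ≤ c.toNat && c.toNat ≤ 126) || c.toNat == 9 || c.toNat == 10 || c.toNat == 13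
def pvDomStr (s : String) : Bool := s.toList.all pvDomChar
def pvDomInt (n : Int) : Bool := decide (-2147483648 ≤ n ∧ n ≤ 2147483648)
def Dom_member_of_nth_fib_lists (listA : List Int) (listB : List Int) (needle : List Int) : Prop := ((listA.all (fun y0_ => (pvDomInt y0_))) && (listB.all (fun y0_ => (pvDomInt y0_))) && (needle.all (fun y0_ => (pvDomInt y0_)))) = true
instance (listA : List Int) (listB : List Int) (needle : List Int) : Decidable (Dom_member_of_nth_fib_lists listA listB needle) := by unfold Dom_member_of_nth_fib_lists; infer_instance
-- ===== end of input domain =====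

-- B replaces A's 8-step iterative pair-shuffling while-loop with a recursive Fibonacci
-- concatenation helper fib (fib 0 = listA, fib 1 = listB, fib n = fib (n-2) ++ fib (n-1))
-- and tests the needle string inside the joined fib 8; return values agree on all inputs.

-- ===== PORT A =====
-- while i < 10: next_list = listA + listB; listA = listB; listB = next_list; i += 1
def pvWhileA (i : Int) (listA listB : List Int) : List Int :=
  if _h : i < 10 then pvWhileA (i + 1) listB (listA ++ listB) else listA
termination_by (10 - i).toNat
decreasing_by omega

def member_of_nth_fib_lists (listA : List Int) (listB : List Int) (needle : List Int) : Bool :=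
  PySem.Str.isIn (PySem.Str.join "" (needle.map PySem.Int.toStr))
    (PySem.Str.join "" ((pvWhileA 2 listA listB).map PySem.Int.toStr))

-- ===== PORT B =====
-- def fib(n): if n == 0: return listA; if n == 1: return listB; return fib(n-2) + fib(n-1)
def pvFibB (listA listB : List Int) : Nat → List Int
  | 0 => listA
  | 1 => listB
  | n + 2 => pvFibB listA listB n ++ pvFibB listA listB (n + 1)

def member_of_nth_fib_lists_alt (listA : List Int) (listB : List Int) (needle : List Int) : Bool :=
  PySem.Str.isIn (PySem.Str.join "" (needle.map PySem.Int.toStr))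
    (PySem.Str.join "" ((pvFibB listA listB 8).map PySem.Int.toStr))

-- ===== PRECONDITION & SPEC =====
def Spec_member_of_nth_fib_lists (listA : List Int) (listB : List Int) (needle : List Int) (out : Bool) : Prop := out = member_of_nth_fib_lists_alt listA listB needle
instance (listA : List Int) (listB : List Int) (needle : List Int) (out : Bool) : Decidable (Spec_member_of_nth_fib_lists listA listB needle out) := by unfold Spec_member_of_nth_fib_lists; infer_instance

-- ===== CLAIM (what is proved, stated in full; the proofs are below) =====
def Claim_equal_member_of_nth_fib_lists : Prop := ∀ (listA : List Int) (listB : List Int) (needle : List Int), Dom_member_of_nth_fib_lists listA listB needle → Spec_member_of_nth_fib_lists listA listB needle (member_of_nth_fib_lists listA listB needle)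

-- ===== LEMMAS AND PROOFS =====

-- ===== VERDICT (by name: the statement is the Claim_ definition above) =====
theorem pvWhile_eq_fib (listA listB : List Int) :
    pvWhileA 2 listA listB = pvFibB listA listB 8 := by
  simp [pvWhileA, pvFibB, List.append_assoc]

theorem member_of_nth_fib_lists_spec : Claim_equal_member_of_nth_fib_lists := by
  intro listA listB needle _
  unfold Spec_member_of_nth_fib_lists member_of_nth_fib_lists member_of_nth_fib_lists_alt
  rw [pvWhile_eq_fib]
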